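-- pv_equiv track=rewrite | github.com/hadam01/HeisenbergBoundaryConditions | main.py | find_num_interactions
-- ===== SOURCE A (Python) =====
-- def find_num_interactions(neighbors_data):
--     seen = []
--     num_interactions = 0
--     # Loop through lattice sites and then neighbors
--     for k in range(0, len(neighbors_data)):
--         neighbors = neighbors_data[k]
--         for j, neighbor_type in neighbors:
--             # Update the Hamiltonian if we see a new interaction
--             if (k, j, neighbor_type) not in seen and (j, k, neighbor_type) not in seen:
--                 num_interactions += 1
--                 seen.append((k, j, neighbor_type))
--     return num_interactions
-- ===== SOURCE B (Python) =====
-- def find_num_interactions(neighbors_data):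
--     # Stage 1: flatten the lattice into canonical undirected edge triples.
--     edges = [(min(k, j), max(k, j), t)
--              for k, neighbors in enumerate(neighbors_data)
--              for j, t in neighbors]
--     # Stage 2: repeatedly strip every copy of the first remaining triple,
--     # counting one interaction per stripped group.
--     count = 0
--     while edges:
--         head = edges[0]
--         edges = [e for e in edges[1:] if e != head]
--         count += 1
--     return count
-- ===== Notes on version B (the rewrite author's own statement) =====
-- stated objective: alternative
-- what changed: Instead of A's online nested loop that scans a growing 'seen' list for both orientations of each pair, B first flattens the lattice into a list of canonical (min,max,type) triples and then counts groups by repeatedly filtering out all copies of the first remaining triple; no 'seen' state or membership test against an accumulator exists.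
import Mathlib
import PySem

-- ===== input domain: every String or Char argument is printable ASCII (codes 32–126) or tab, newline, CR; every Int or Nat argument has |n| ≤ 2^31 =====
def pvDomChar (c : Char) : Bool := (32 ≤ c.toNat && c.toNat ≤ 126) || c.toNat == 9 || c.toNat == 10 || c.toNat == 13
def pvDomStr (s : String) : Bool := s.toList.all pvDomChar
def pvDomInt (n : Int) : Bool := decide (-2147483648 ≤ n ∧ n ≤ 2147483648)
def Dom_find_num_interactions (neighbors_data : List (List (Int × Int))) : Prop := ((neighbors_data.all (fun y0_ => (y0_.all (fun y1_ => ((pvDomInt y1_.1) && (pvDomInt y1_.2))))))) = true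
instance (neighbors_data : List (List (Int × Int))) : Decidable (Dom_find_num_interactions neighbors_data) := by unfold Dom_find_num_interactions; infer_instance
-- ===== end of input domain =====

-- B replaces A's online nested loop over a growing 'seen' list by two stages:
-- flatten the lattice into canonical (min,max,type) triples, then count groups by
-- repeatedly filtering out all copies of the first remaining triple (objective: alternative).

-- ===== PORT A =====
def find_num_interactions (neighbors_data : List (List (Int × Int))) : Int :=
  let st := (PySem.List.pyRange 0 (PySem.List.len neighbors_data) 1).foldl
    (fun (st : List (Int × Int × Int) × Int) k =>
      let neighbors := PySem.List.pyGetD neighbors_data k []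
      neighbors.foldl
        (fun (st : List (Int × Int × Int) × Int) jt =>
          if (k, jt.1, jt.2) ∉ st.1 ∧ (jt.1, k, jt.2) ∉ st.1 then
            (st.1 ++ [(k, jt.1, jt.2)], st.2 + 1)
          else st) st)
    ([], 0)
  st.2

-- ===== PORT B =====
-- the 'while edges:' loop of Source B: strip all copies of the first triple, count 1, repeat
def pvStrip (edges : List (Int × Int × Int)) (count : Int) : Int :=
  match edges with
  | [] => count
  | head :: rest => pvStrip (rest.filter (fun e => e ≠ head)) (count + 1)
termination_by edges.length
decreasing_by
  simpa using Nat.lt_succ_of_le (le_trans (List.length_filter_le _ rest.attach) (by simp))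

def find_num_interactions_alt (neighbors_data : List (List (Int × Int))) : Int :=
  let edges := (PySem.List.enumerate neighbors_data).flatMap
    (fun kn => kn.2.map (fun jt => (min kn.1 jt.1, max kn.1 jt.1, jt.2)))
  pvStrip edges 0

-- ===== PRECONDITION & SPEC =====
def Spec_find_num_interactions (neighbors_data : List (List (Int × Int))) (out : Int) : Prop := out = find_num_interactions_alt neighbors_data
instance (neighbors_data : List (List (Int × Int))) (out : Int) : Decidable (Spec_find_num_interactions neighbors_data out) := by unfold Spec_find_num_interactions; infer_instance

-- ===== CLAIM (what is proved, stated in full; the proofs are below) =====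
def Claim_equal_find_num_interactions : Prop := ∀ (neighbors_data : List (List (Int × Int))), Dom_find_num_interactions neighbors_data → Spec_find_num_interactions neighbors_data (find_num_interactions neighbors_data)

-- ===== LEMMAS AND PROOFS =====

def pvCanon (p : Int × Int × Int) : Int × Int × Int := (min p.1 p.2.1, max p.1 p.2.1, p.2.2)

theorem pvCanon_eq_iff (a b t k j u : Int) :
    pvCanon (a, b, t) = pvCanon (k, j, u) ↔ ((a, b, t) = (k, j, u) ∨ (a, b, t) = (j, k, u)) := by
  simp only [pvCanon, Prod.mk.injEq]
  constructor
  · rintro ⟨h1, h2, h3⟩; omega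
  · rintro (⟨h1, h2, h3⟩ | ⟨h1, h2, h3⟩) <;> subst h1 <;> subst h2 <;> subst h3 <;>
      refine ⟨?_, ?_, rfl⟩ <;> omega

theorem pvMem_map_canon (seen : List (Int × Int × Int)) (k j t : Int) :
    pvCanon (k, j, t) ∈ seen.map pvCanon ↔ ((k, j, t) ∈ seen ∨ (j, k, t) ∈ seen) := by
  rw [List.mem_map]
  constructor
  · rintro ⟨⟨a, b, u⟩, hmem, heq⟩
    rcases (pvCanon_eq_iff a b u k j t).1 heq with h | h
    · exact Or.inl (h ▸ hmem)
    · exact Or.inr (h ▸ hmem)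
  · rintro (h | h)
    · exact ⟨(k, j, t), h, rfl⟩
    · exact ⟨(j, k, t), h, (pvCanon_eq_iff j k t k j t).2 (Or.inr rfl)⟩

-- one site's neighbor list: A's inner fold mirrored as a set fold over canonical triples
theorem pvInner (k : Int) (ns : List (Int × Int)) (seen : List (Int × Int × Int)) :
    ns.foldl (fun (s : PySem.Set (Int × Int × Int)) jt =>
        PySem.Set.add s (min k jt.1, max k jt.1, jt.2)) (seen.map pvCanon)
      = (ns.foldl
          (fun (st : List (Int × Int × Int) × Int) jt =>
            if (k, jt.1, jt.2) ∉ st.1 ∧ (jt.1, k, jt.2) ∉ st.1 then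
              (st.1 ++ [(k, jt.1, jt.2)], st.2 + 1)
            else st) (seen, (seen.length : Int))).1.map pvCanon
    ∧ (ns.foldl
          (fun (st : List (Int × Int × Int) × Int) jt =>
            if (k, jt.1, jt.2) ∉ st.1 ∧ (jt.1, k, jt.2) ∉ st.1 then
              (st.1 ++ [(k, jt.1, jt.2)], st.2 + 1)
            else st) (seen, (seen.length : Int))).2
        = (((ns.foldl
          (fun (st : List (Int × Int × Int) × Int) jt =>
            if (k, jt.1, jt.2) ∉ st.1 ∧ (jt.1, k, jt.2) ∉ st.1 then
              (st.1 ++ [(k, jt.1, jt.2)], st.2 + 1)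
            else st) (seen, (seen.length : Int))).1.length : Int)) := by
  induction ns generalizing seen with
  | nil => exact ⟨rfl, rfl⟩
  | cons jt rest ih =>
    obtain ⟨j, t⟩ := jt
    simp only [List.foldl_cons]
    by_cases h : (k, j, t) ∉ seen ∧ (j, k, t) ∉ seen
    · have hnot : pvCanon (k, j, t) ∉ seen.map pvCanon := by
        rw [pvMem_map_canon]; tauto
      have hadd : PySem.Set.add (seen.map pvCanon) (min k j, max k j, t)
          = (seen ++ [(k, j, t)]).map pvCanon := by
        simp only [PySem.Set.add]
        rw [if_neg (by simpa [pvCanon] using hnot)]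
        simp [pvCanon]
      rw [if_pos h, hadd]
      have := ih (seen ++ [(k, j, t)])
      simpa using this
    · have hmem : pvCanon (k, j, t) ∈ seen.map pvCanon := by
        rw [pvMem_map_canon]; tauto
      have hadd : PySem.Set.add (seen.map pvCanon) (min k j, max k j, t) = seen.map pvCanon := by
        simp only [PySem.Set.add]
        rw [if_pos (by simpa [pvCanon] using hmem)]
      rw [if_neg h, hadd]
      exact ih seen

-- the outer loop over an arbitrary list of (index, neighbor-list) pairs
theorem pvOuter (L : List (Int × List (Int × Int))) (seen : List (Int × Int × Int)) :
    L.foldl (fun (s : PySem.Set (Int × Int × Int)) kn =>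
        kn.2.foldl (fun s jt => PySem.Set.add s (min kn.1 jt.1, max kn.1 jt.1, jt.2)) s)
      (seen.map pvCanon)
      = (L.foldl (fun (st : List (Int × Int × Int) × Int) kn =>
          kn.2.foldl
            (fun (st : List (Int × Int × Int) × Int) jt =>
              if (kn.1, jt.1, jt.2) ∉ st.1 ∧ (jt.1, kn.1, jt.2) ∉ st.1 then
                (st.1 ++ [(kn.1, jt.1, jt.2)], st.2 + 1)
              else st) st) (seen, (seen.length : Int))).1.map pvCanon
    ∧ (L.foldl (fun (st : List (Int × Int × Int) × Int) kn =>
          kn.2.foldl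
            (fun (st : List (Int × Int × Int) × Int) jt =>
              if (kn.1, jt.1, jt.2) ∉ st.1 ∧ (jt.1, kn.1, jt.2) ∉ st.1 then
                (st.1 ++ [(kn.1, jt.1, jt.2)], st.2 + 1)
              else st) st) (seen, (seen.length : Int))).2
        = ((L.foldl (fun (st : List (Int × Int × Int) × Int) kn =>
          kn.2.foldl
            (fun (st : List (Int × Int × Int) × Int) jt =>
              if (kn.1, jt.1, jt.2) ∉ st.1 ∧ (jt.1, kn.1, jt.2) ∉ st.1 then
                (st.1 ++ [(kn.1, jt.1, jt.2)], st.2 + 1)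
              else st) st) (seen, (seen.length : Int))).1.length : Int) := by
  induction L generalizing seen with
  | nil => exact ⟨rfl, rfl⟩
  | cons kn rest ih =>
    obtain ⟨k, ns⟩ := kn
    simp only [List.foldl_cons]
    obtain ⟨h1, h2⟩ := pvInner k ns seen
    set st' := ns.foldl
      (fun (st : List (Int × Int × Int) × Int) jt =>
        if (k, jt.1, jt.2) ∉ st.1 ∧ (jt.1, k, jt.2) ∉ st.1 then
          (st.1 ++ [(k, jt.1, jt.2)], st.2 + 1)
        else st) (seen, (seen.length : Int)) with hst
    have hst' : st' = (st'.1, (st'.1.length : Int)) := by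
      rw [Prod.ext_iff]; exact ⟨rfl, h2⟩
    rw [h1, hst']
    exact ih st'.1

-- B's loop counts the distinct triples of its input list
theorem pvStrip_eq_card (l : List (Int × Int × Int)) (c : Int) :
    pvStrip l c = c + (l.toFinset.card : Int) := by
  induction hn : l.length using Nat.strong_induction_on generalizing l c with
  | _ n ih =>
    match l with
    | [] => rw [pvStrip.eq_def]; simp
    | x :: xs =>
      rw [pvStrip.eq_def]
      have hlen : (xs.filter (fun e => e ≠ x)).length < n := by
        subst hn
        simpa using Nat.lt_succ_of_le (List.length_filter_le _ xs)
      show pvStrip (xs.filter (fun e => e ≠ x)) (c + 1) = _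
      rw [ih _ hlen _ _ rfl]
      have hfin : (xs.filter (fun e => e ≠ x)).toFinset = (x :: xs).toFinset.erase x := by
        ext a
        simp [List.mem_toFinset, Finset.mem_erase, and_comm]
      have hx : x ∈ (x :: xs).toFinset := by simp
      have := Finset.card_erase_add_one hx
      rw [hfin]
      omega

-- a Python set's size is the number of distinct elements
theorem pvOfList_length (l : List (Int × Int × Int)) :
    ((PySem.Set.ofList l).length : Int) = (l.toFinset.card : Int) := by
  have hnd : (PySem.Set.ofList l).Nodup := PySem.Set.nodup_ofList l
  have hfin : (PySem.Set.ofList l).toFinset = l.toFinset := by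
    ext a
    simp [List.mem_toFinset, PySem.Set.mem_ofList]
  rw [← List.toFinset_card_of_nodup hnd, hfin]

theorem find_num_interactions_spec : Claim_equal_find_num_interactions := by
  intro nd _
  unfold Spec_find_num_interactions find_num_interactions find_num_interactions_alt
  set L := (PySem.List.pyRange 0 (PySem.List.len nd) 1).map
      (fun j => (j, PySem.List.pyGetD nd j ([] : List (Int × Int)))) with hL
  set edges := L.flatMap (fun kn => kn.2.map (fun jt => (min kn.1 jt.1, max kn.1 jt.1, jt.2)))
    with hedges
  -- A's count = size of the set of canonical triples
  obtain ⟨h1, h2⟩ := pvOuter L []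
  simp only [List.length_nil, Nat.cast_zero, List.map_nil] at h1 h2
  have hA : (L.foldl (fun (st : List (Int × Int × Int) × Int) kn =>
      kn.2.foldl
        (fun (st : List (Int × Int × Int) × Int) jt =>
          if (kn.1, jt.1, jt.2) ∉ st.1 ∧ (jt.1, kn.1, jt.2) ∉ st.1 then
            (st.1 ++ [(kn.1, jt.1, jt.2)], st.2 + 1)
          else st) st) ([], 0)).2
      = ((PySem.Set.ofList edges).length : Int) := by
    have hset : L.foldl (fun (s : PySem.Set (Int × Int × Int)) kn =>
        kn.2.foldl (fun s jt => PySem.Set.add s (min kn.1 jt.1, max kn.1 jt.1, jt.2)) s) []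
        = PySem.Set.ofList edges := by
      rw [hedges, PySem.Set.ofList_eq_foldl, List.foldl_flatMap]
      simp only [List.foldl_map]
    rw [h2, ← List.length_map pvCanon, ← h1, hset]
  have hAport : find_num_interactions nd = (L.foldl (fun (st : List (Int × Int × Int) × Int) kn =>
      kn.2.foldl
        (fun (st : List (Int × Int × Int) × Int) jt =>
          if (kn.1, jt.1, jt.2) ∉ st.1 ∧ (jt.1, kn.1, jt.2) ∉ st.1 then
            (st.1 ++ [(kn.1, jt.1, jt.2)], st.2 + 1)
          else st) st) ([], 0)).2 := by
    unfold find_num_interactions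
    rw [hL, List.foldl_map]
  -- B's count = number of distinct canonical triples
  have hB : find_num_interactions_alt nd = pvStrip edges 0 := by
    unfold find_num_interactions_alt
    rw [PySem.List.enumerate_eq_map_pyRange nd ([] : List (Int × Int)), ← hL, ← hedges]
  show find_num_interactions nd = find_num_interactions_alt nd
  rw [hAport, hA, hB, pvStrip_eq_card, pvOfList_length]
  ring
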